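-- pv_equiv track=rewrite | github.com/venyapanou95/qap_14_panov | homework4.py | count_digits_sum
-- ===== SOURCE A (Python) =====
-- def count_digits_sum(N):
--     count = 0
--     digit_sum = 0
--     while N > 0:
--         digit = N % 10
--         count += 1
--         digit_sum += digit
--         N //= 10
--     return count, digit_sum
-- ===== SOURCE B (Python) =====
-- def count_digits_sum(N):
--     if N <= 0:
--         return (0, 0)
--     s = str(N)
--     return (len(s), sum(int(c) for c in s))
-- ===== Notes on version B (the rewrite author's own statement) =====
-- stated objective: idiomatic
-- what changed: B converts N to its decimal string once and reads length and per-character digit sum from the string, instead of A's modulo/floor-division peeling loop.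
import Mathlib
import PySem

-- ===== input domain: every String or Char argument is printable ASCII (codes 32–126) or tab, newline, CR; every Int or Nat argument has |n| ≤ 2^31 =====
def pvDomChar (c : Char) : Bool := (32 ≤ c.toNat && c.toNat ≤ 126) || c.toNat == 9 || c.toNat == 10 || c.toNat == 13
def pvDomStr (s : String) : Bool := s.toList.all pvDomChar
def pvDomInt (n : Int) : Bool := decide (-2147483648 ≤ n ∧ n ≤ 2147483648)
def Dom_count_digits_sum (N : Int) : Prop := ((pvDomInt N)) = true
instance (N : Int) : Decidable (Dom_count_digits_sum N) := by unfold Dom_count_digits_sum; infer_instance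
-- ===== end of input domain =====

-- B converts N to its decimal string once and reads length and digit sum off the string,
-- instead of A's modulo/floor-division peeling loop (idiomatic alternative, same cost).


-- ===== PORT A =====
-- 'while N > 0: digit = N % 10; count += 1; digit_sum += digit; N //= 10'
def pvALoop (N count digit_sum : Int) : Int × Int :=
  if _h : N > 0 then
    pvALoop (PySem.Int.floordiv N 10) (count + 1) (digit_sum + PySem.Int.mod N 10)
  else (count, digit_sum)
termination_by N.toNat
decreasing_by
  rw [PySem.Int.floordiv_eq_ediv_of_pos (by omega)]; omega

def count_digits_sum (N : Int) : Int × Int := pvALoop N 0 0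

-- ===== PORT B =====
-- int(c) for a single character c
def pvDigitVal (c : Char) : Int := (PySem.Int.ofChars? [c]).getD 0

def count_digits_sum_alt (N : Int) : Int × Int :=
  if N ≤ 0 then (0, 0)
  else
    let s := PySem.Int.toChars N
    ((s.length : Int), (s.map pvDigitVal).sum)

-- ===== PRECONDITION & SPEC =====
def Spec_count_digits_sum (N : Int) (out : Int × Int) : Prop := out = count_digits_sum_alt N
instance (N : Int) (out : Int × Int) : Decidable (Spec_count_digits_sum N out) := by unfold Spec_count_digits_sum; infer_instance

-- ===== CLAIM (what is proved, stated in full; the proofs are below) =====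
def Claim_equal_count_digits_sum : Prop := ∀ (N : Int), Dom_count_digits_sum N → Spec_count_digits_sum N (count_digits_sum N)

-- ===== LEMMAS AND PROOFS =====

lemma pvDigitVal_digitChar (d : Nat) (hd : d < 10) : pvDigitVal (Nat.digitChar d) = (d : Int) := by
  interval_cases d <;> decide

lemma pvALoop_eq (m : Nat) (h : 0 < m) : ∀ (count digit_sum : Int),
    pvALoop (m : Int) count digit_sum =
      (count + ((Nat.toDigits 10 m).length : Int),
       digit_sum + ((Nat.toDigits 10 m).map pvDigitVal).sum) := by
  induction m using Nat.strong_induction_on with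
  | _ m ih =>
    intro count digit_sum
    rw [pvALoop]
    have hpos : ((m : Int) > 0) := by exact_mod_cast h
    rw [dif_pos hpos]
    have hdiv : PySem.Int.floordiv (m : Int) 10 = ((m / 10 : Nat) : Int) := by
      exact_mod_cast PySem.Int.floordiv_natCast m 10
    have hmod : PySem.Int.mod (m : Int) 10 = ((m % 10 : Nat) : Int) := by
      exact_mod_cast PySem.Int.mod_natCast m 10
    rw [hdiv, hmod]
    by_cases hlt : m < 10
    · rw [Nat.div_eq_of_lt hlt, Nat.mod_eq_of_lt hlt]
      rw [pvALoop]
      rw [dif_neg (by norm_num)]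
      rw [Nat.toDigits_of_lt_base hlt]
      simp [pvDigitVal_digitChar m hlt]
    · have hge : 10 ≤ m := le_of_not_gt hlt
      have hq : 0 < m / 10 := Nat.div_pos hge (by norm_num)
      have hlt' : m / 10 < m := Nat.div_lt_self h (by norm_num)
      rw [ih (m / 10) hlt' hq]
      rw [Nat.toDigits_of_base_le (by norm_num) hge]
      rw [List.map_append, List.sum_append, List.length_append]
      simp [pvDigitVal_digitChar (m % 10) (Nat.mod_lt m (by norm_num))]
      constructor <;> ring

-- ===== VERDICT (by name: the statement is the Claim_ definition above) =====
theorem count_digits_sum_spec : Claim_equal_count_digits_sum := by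
  intro N _
  unfold Spec_count_digits_sum count_digits_sum count_digits_sum_alt
  by_cases hle : N ≤ 0
  · rw [if_pos hle, pvALoop, dif_neg (by omega)]
  · rw [if_neg hle]
    have hpos : 0 < N := lt_of_not_ge hle
    have hN : N = ((N.toNat : Nat) : Int) := by omega
    have hm : 0 < N.toNat := by omega
    rw [hN, pvALoop_eq N.toNat hm 0 0]
    have : PySem.Int.toChars ((N.toNat : Nat) : Int) = Nat.toDigits 10 N.toNat := by
      unfold PySem.Int.toChars
      rw [if_neg (by omega), Int.toNat_natCast]
    rw [this]
    simp
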